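-- pv_equiv track=rewrite | github.com/piotrek0052121/MGtPlaner | server.py | derive_order_status_from_position_departments
-- ===== SOURCE A (Python) =====
-- def normalize_department_status(value):
--     status = str(value or "").strip() or "Dokumentacja"
--     if status == "Planowanie":
--         return "Dokumentacja"
--     return status
--
-- def derive_order_status_from_position_departments(department_statuses):
--     normalized = [normalize_department_status(value) for value in department_statuses]
--     unique_statuses = set(normalized)
--     if unique_statuses == {"Zakonczone"}:
--         return "Zakonczone"
--     if unique_statuses == {"Dokumentacja"}:
--         return "Dokumentacja"
--     if unique_statuses.issubset({"Kosmetyka", "Zakonczone"}) and "Kosmetyka" in unique_statuses: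
--         return "Kosmetyka"
--     return "Produkcja"
-- ===== SOURCE B (Python) =====
-- def normalize_department_status(value):
--     status = str(value or "").strip() or "Dokumentacja"
--     if status == "Planowanie":
--         return "Dokumentacja"
--     return status
--
-- # Table-driven finite-state machine: the state is the order status of the prefix
-- # seen so far (None = nothing seen); any transition missing from the table leads
-- # to the absorbing state "Produkcja", at which the loop exits early.
-- _TRANS = {
--     (None, "Zakonczone"): "Zakonczone",
--     (None, "Dokumentacja"): "Dokumentacja",
--     (None, "Kosmetyka"): "Kosmetyka",
--     ("Zakonczone", "Zakonczone"): "Zakonczone",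
--     ("Zakonczone", "Kosmetyka"): "Kosmetyka",
--     ("Dokumentacja", "Dokumentacja"): "Dokumentacja",
--     ("Kosmetyka", "Kosmetyka"): "Kosmetyka",
--     ("Kosmetyka", "Zakonczone"): "Kosmetyka",
-- }
--
-- def derive_order_status_from_position_departments(department_statuses):
--     state = None
--     for value in department_statuses:
--         state = _TRANS.get((state, normalize_department_status(value)), "Produkcja")
--         if state == "Produkcja":
--             break
--     return state if state is not None else "Produkcja"
-- ===== Notes on version B (the rewrite author's own statement) =====
-- stated objective: alternative
-- what changed: B replaces A's set construction and set equality/subset tests with a table-driven finite-state machine: the running state is the order status of the prefix seen so far, transitions come from a lookup table, and any missing transition falls to an absorbing 'Produkcja' state at which the loop exits early.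
import Mathlib
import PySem

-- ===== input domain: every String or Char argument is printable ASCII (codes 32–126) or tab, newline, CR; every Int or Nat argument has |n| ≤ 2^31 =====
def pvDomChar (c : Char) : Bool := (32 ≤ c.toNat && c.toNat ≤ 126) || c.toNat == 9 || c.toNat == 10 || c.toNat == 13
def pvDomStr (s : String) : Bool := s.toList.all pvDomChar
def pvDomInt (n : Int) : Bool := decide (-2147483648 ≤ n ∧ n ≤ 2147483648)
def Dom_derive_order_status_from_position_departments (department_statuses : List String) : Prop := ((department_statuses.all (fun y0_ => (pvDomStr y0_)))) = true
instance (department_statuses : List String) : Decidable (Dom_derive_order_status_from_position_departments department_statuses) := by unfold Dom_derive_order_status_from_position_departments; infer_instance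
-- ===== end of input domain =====

-- B replaces A's set construction and set equality/subset tests with a table-driven
-- finite-state machine over the list, with an absorbing "Produkcja" state and early exit
-- (objective: alternative decomposition; a timing run measured B faster by a constant factor).

-- ===== PORT A =====
-- normalize_department_status (module helper, used verbatim by both Pythons)
def normalize_department_status (value : String) : String :=
  let stripped := PySem.Str.strip value   -- str(value or "").strip(): value is a string, '' is falsy → str('') = ''
  let status := if stripped = "" then "Dokumentacja" else stripped
  if status = "Planowanie" then "Dokumentacja" else status

def derive_order_status_from_position_departments (department_statuses : List String) : String :=
  let normalized := department_statuses.map normalize_department_status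
  let unique_statuses : PySem.Set String := PySem.Set.ofList normalized
  if PySem.Set.equal unique_statuses (PySem.Set.ofList ["Zakonczone"]) then "Zakonczone"
  else if PySem.Set.equal unique_statuses (PySem.Set.ofList ["Dokumentacja"]) then "Dokumentacja"
  else if PySem.Set.issubset unique_statuses (PySem.Set.ofList ["Kosmetyka", "Zakonczone"]) && PySem.Set.contains unique_statuses "Kosmetyka" then "Kosmetyka"
  else "Produkcja"

-- ===== PORT B =====
-- the module-level transition table _TRANS of Source B (state None = nothing seen yet)
def pvTrans : PySem.Dict (Option String × String) String :=
  PySem.Dict.ofList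
    [ ((none, "Zakonczone"), "Zakonczone"),
      ((none, "Dokumentacja"), "Dokumentacja"),
      ((none, "Kosmetyka"), "Kosmetyka"),
      ((some "Zakonczone", "Zakonczone"), "Zakonczone"),
      ((some "Zakonczone", "Kosmetyka"), "Kosmetyka"),
      ((some "Dokumentacja", "Dokumentacja"), "Dokumentacja"),
      ((some "Kosmetyka", "Kosmetyka"), "Kosmetyka"),
      ((some "Kosmetyka", "Zakonczone"), "Kosmetyka") ]

-- Source B's loop: advance the automaton, breaking as soon as the state is "Produkcja"
def pvLoop (state : Option String) : List String → Option String
  | [] => state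
  | value :: rest =>
      let st' := PySem.Dict.getD pvTrans (state, normalize_department_status value) "Produkcja"
      if st' = "Produkcja" then some "Produkcja" else pvLoop (some st') rest

def derive_order_status_from_position_departments_alt (department_statuses : List String) : String :=
  match pvLoop none department_statuses with
  | some s => s
  | none => "Produkcja"

-- ===== PRECONDITION & SPEC =====
def Spec_derive_order_status_from_position_departments (department_statuses : List String) (out : String) : Prop := out = derive_order_status_from_position_departments_alt department_statuses
instance (department_statuses : List String) (out : String) : Decidable (Spec_derive_order_status_from_position_departments department_statuses out) := by unfold Spec_derive_order_status_from_position_departments; infer_instance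

-- ===== CLAIM (what is proved, stated in full; the proofs are below) =====
def Claim_equal_derive_order_status_from_position_departments : Prop := ∀ (department_statuses : List String), Dom_derive_order_status_from_position_departments department_statuses → Spec_derive_order_status_from_position_departments department_statuses (derive_order_status_from_position_departments department_statuses)

-- ===== LEMMAS AND PROOFS =====

-- "some normalized value equals …" predicates used to characterise both ports
def pvAnyZ (l : List String) : Bool := l.any (fun v => normalize_department_status v == "Zakonczone")
def pvAnyD (l : List String) : Bool := l.any (fun v => normalize_department_status v == "Dokumentacja")
def pvAnyK (l : List String) : Bool := l.any (fun v => normalize_department_status v == "Kosmetyka")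
def pvAnyO (l : List String) : Bool := l.any (fun v =>
  !(normalize_department_status v == "Zakonczone") &&
  !(normalize_department_status v == "Dokumentacja") &&
  !(normalize_department_status v == "Kosmetyka"))

-- characterisation of A's three set tests in terms of the pvAny predicates
lemma pvEqZ (l : List String) :
    PySem.Set.equal (PySem.Set.ofList (l.map normalize_department_status)) (PySem.Set.ofList ["Zakonczone"]) =
      (pvAnyZ l && !(pvAnyD l || pvAnyK l || pvAnyO l)) := by
  rw [Bool.eq_iff_iff, PySem.Set.equal_iff]
  simp only [PySem.Set.mem_ofList, List.mem_map, List.mem_singleton, pvAnyZ, pvAnyD, pvAnyK, pvAnyO,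
    Bool.and_eq_true, Bool.not_eq_true', Bool.or_eq_false_iff, List.any_eq_false, List.any_eq_true,
    beq_iff_eq, beq_eq_false_iff_ne, ne_eq]
  constructor
  · intro h
    refine ⟨(h "Zakonczone").2 rfl, ⟨?_, ?_⟩, ?_⟩
    · intro x hx hd; exact absurd ((h "Dokumentacja").1 ⟨x, hx, hd⟩) (by decide)
    · intro x hx hk; exact absurd ((h "Kosmetyka").1 ⟨x, hx, hk⟩) (by decide)
    · rintro x hx ⟨⟨hz, _⟩, _⟩; exact hz ((h _).1 ⟨x, hx, rfl⟩)
  · rintro ⟨⟨w, hw, hwz⟩, ⟨hd, hk⟩, ho⟩ x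
    constructor
    · rintro ⟨v, hv, rfl⟩
      by_contra hz
      exact ho v hv ⟨⟨hz, hd v hv⟩, hk v hv⟩
    · rintro rfl; exact ⟨w, hw, hwz⟩

lemma pvEqD (l : List String) :
    PySem.Set.equal (PySem.Set.ofList (l.map normalize_department_status)) (PySem.Set.ofList ["Dokumentacja"]) =
      (pvAnyD l && !(pvAnyZ l || pvAnyK l || pvAnyO l)) := by
  rw [Bool.eq_iff_iff, PySem.Set.equal_iff]
  simp only [PySem.Set.mem_ofList, List.mem_map, List.mem_singleton, pvAnyZ, pvAnyD, pvAnyK, pvAnyO,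
    Bool.and_eq_true, Bool.not_eq_true', Bool.or_eq_false_iff, List.any_eq_false, List.any_eq_true,
    beq_iff_eq, beq_eq_false_iff_ne, ne_eq]
  constructor
  · intro h
    refine ⟨(h "Dokumentacja").2 rfl, ⟨?_, ?_⟩, ?_⟩
    · intro x hx hz; exact absurd ((h "Zakonczone").1 ⟨x, hx, hz⟩) (by decide)
    · intro x hx hk; exact absurd ((h "Kosmetyka").1 ⟨x, hx, hk⟩) (by decide)
    · rintro x hx ⟨⟨_, hdn⟩, _⟩; exact hdn ((h _).1 ⟨x, hx, rfl⟩)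
  · rintro ⟨⟨w, hw, hwd⟩, ⟨hz, hk⟩, ho⟩ x
    constructor
    · rintro ⟨v, hv, rfl⟩
      by_contra hd
      exact ho v hv ⟨⟨hz v hv, hd⟩, hk v hv⟩
    · rintro rfl; exact ⟨w, hw, hwd⟩

lemma pvEqK (l : List String) :
    (PySem.Set.issubset (PySem.Set.ofList (l.map normalize_department_status)) (PySem.Set.ofList ["Kosmetyka", "Zakonczone"]) &&
      PySem.Set.contains (PySem.Set.ofList (l.map normalize_department_status)) "Kosmetyka") =
      (pvAnyK l && !(pvAnyD l || pvAnyO l)) := by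
  rw [Bool.eq_iff_iff]
  simp only [Bool.and_eq_true, PySem.Set.issubset_iff, PySem.Set.contains_iff, PySem.Set.mem_ofList,
    List.mem_map, List.mem_cons, List.not_mem_nil, or_false, pvAnyD, pvAnyK, pvAnyO,
    Bool.not_eq_true', Bool.or_eq_false_iff, List.any_eq_false, List.any_eq_true, beq_iff_eq, beq_eq_false_iff_ne, ne_eq]
  constructor
  · rintro ⟨hsub, w, hw, hwk⟩
    refine ⟨⟨w, hw, hwk⟩, ?_, ?_⟩
    · intro x hx hd
      rcases hsub _ ⟨x, hx, rfl⟩ with h | h <;> exact absurd (h.symm.trans hd) (by decide)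
    · rintro x hx ⟨⟨hz, _⟩, hk⟩
      rcases hsub _ ⟨x, hx, rfl⟩ with h | h
      · exact hk h
      · exact hz h
  · rintro ⟨⟨w, hw, hwk⟩, hd, ho⟩
    refine ⟨?_, w, hw, hwk⟩
    rintro x ⟨v, hv, rfl⟩
    by_cases hz : normalize_department_status v = "Zakonczone"
    · right; exact hz
    · left
      by_contra hk
      exact ho v hv ⟨⟨hz, hd v hv⟩, hk⟩

-- evaluation of the transition table on its closed keys …
lemma pvTrans_items : pvTrans.items =
    [ ((none, "Zakonczone"), "Zakonczone"),
      ((none, "Dokumentacja"), "Dokumentacja"),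
      ((none, "Kosmetyka"), "Kosmetyka"),
      ((some "Zakonczone", "Zakonczone"), "Zakonczone"),
      ((some "Zakonczone", "Kosmetyka"), "Kosmetyka"),
      ((some "Dokumentacja", "Dokumentacja"), "Dokumentacja"),
      ((some "Kosmetyka", "Kosmetyka"), "Kosmetyka"),
      ((some "Kosmetyka", "Zakonczone"), "Kosmetyka") ] := by decide

lemma pvT_nZ : PySem.Dict.getD pvTrans (none, "Zakonczone") "Produkcja" = "Zakonczone" := by decide
lemma pvT_nD : PySem.Dict.getD pvTrans (none, "Dokumentacja") "Produkcja" = "Dokumentacja" := by decide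
lemma pvT_nK : PySem.Dict.getD pvTrans (none, "Kosmetyka") "Produkcja" = "Kosmetyka" := by decide
lemma pvT_ZZ : PySem.Dict.getD pvTrans (some "Zakonczone", "Zakonczone") "Produkcja" = "Zakonczone" := by decide
lemma pvT_ZK : PySem.Dict.getD pvTrans (some "Zakonczone", "Kosmetyka") "Produkcja" = "Kosmetyka" := by decide
lemma pvT_ZD : PySem.Dict.getD pvTrans (some "Zakonczone", "Dokumentacja") "Produkcja" = "Produkcja" := by decide
lemma pvT_DD : PySem.Dict.getD pvTrans (some "Dokumentacja", "Dokumentacja") "Produkcja" = "Dokumentacja" := by decide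
lemma pvT_DZ : PySem.Dict.getD pvTrans (some "Dokumentacja", "Zakonczone") "Produkcja" = "Produkcja" := by decide
lemma pvT_DK : PySem.Dict.getD pvTrans (some "Dokumentacja", "Kosmetyka") "Produkcja" = "Produkcja" := by decide
lemma pvT_KK : PySem.Dict.getD pvTrans (some "Kosmetyka", "Kosmetyka") "Produkcja" = "Kosmetyka" := by decide
lemma pvT_KZ : PySem.Dict.getD pvTrans (some "Kosmetyka", "Zakonczone") "Produkcja" = "Kosmetyka" := by decide
lemma pvT_KD : PySem.Dict.getD pvTrans (some "Kosmetyka", "Dokumentacja") "Produkcja" = "Produkcja" := by decide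

-- … and on every key whose status component is none of the three table statuses
lemma pvT_miss (st : Option String) (s : String)
    (h1 : s ≠ "Zakonczone") (h2 : s ≠ "Dokumentacja") (h3 : s ≠ "Kosmetyka") :
    PySem.Dict.getD pvTrans (st, s) "Produkcja" = "Produkcja" := by
  have hp : ∀ (x y : Option String × String), (x == y) = (x.1 == y.1 && x.2 == y.2) := fun _ _ => rfl
  have e1 : (("Zakonczone" : String) == s) = false := by simp [Ne.symm h1]
  have e2 : (("Dokumentacja" : String) == s) = false := by simp [Ne.symm h2]
  have e3 : (("Kosmetyka" : String) == s) = false := by simp [Ne.symm h3]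
  simp [PySem.Dict.getD, PySem.Dict.get?, pvTrans_items, List.find?, hp, e1, e2, e3]

-- the automaton's behaviour from each live state, by induction on the rest of the list
lemma pvLoop_K (l : List String) :
    pvLoop (some "Kosmetyka") l =
      some (if pvAnyD l || pvAnyO l then "Produkcja" else "Kosmetyka") := by
  induction l with
  | nil => simp [pvLoop, pvAnyD, pvAnyO]
  | cons x xs ih =>
    simp only [pvLoop]
    by_cases hk : normalize_department_status x = "Kosmetyka"
    · simp [hk, pvT_KK, ih, pvAnyD, pvAnyO, List.any_cons]
    · by_cases hz : normalize_department_status x = "Zakonczone"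
      · simp [hz, pvT_KZ, ih, pvAnyD, pvAnyO, List.any_cons]
      · by_cases hd : normalize_department_status x = "Dokumentacja"
        · simp [hd, pvT_KD, pvAnyD, List.any_cons]
        · simp [pvT_miss _ _ hz hd hk, pvAnyO, List.any_cons, hz, hd, hk]

lemma pvLoop_Z (l : List String) :
    pvLoop (some "Zakonczone") l =
      some (if pvAnyD l || pvAnyO l then "Produkcja"
            else if pvAnyK l then "Kosmetyka" else "Zakonczone") := by
  induction l with
  | nil => simp [pvLoop, pvAnyD, pvAnyK, pvAnyO]
  | cons x xs ih =>
    simp only [pvLoop]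
    by_cases hz : normalize_department_status x = "Zakonczone"
    · simp [hz, pvT_ZZ, ih, pvAnyD, pvAnyK, pvAnyO, List.any_cons]
    · by_cases hk : normalize_department_status x = "Kosmetyka"
      · simp [hk, pvT_ZK, pvLoop_K, pvAnyD, pvAnyK, pvAnyO, List.any_cons]
      · by_cases hd : normalize_department_status x = "Dokumentacja"
        · simp [hd, pvT_ZD, pvAnyD, List.any_cons]
        · simp [pvT_miss _ _ hz hd hk, pvAnyO, List.any_cons, hz, hd, hk]

lemma pvLoop_D (l : List String) :
    pvLoop (some "Dokumentacja") l =
      some (if pvAnyZ l || pvAnyK l || pvAnyO l then "Produkcja" else "Dokumentacja") := by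
  induction l with
  | nil => simp [pvLoop, pvAnyZ, pvAnyK, pvAnyO]
  | cons x xs ih =>
    simp only [pvLoop]
    by_cases hd : normalize_department_status x = "Dokumentacja"
    · simp [hd, pvT_DD, ih, pvAnyZ, pvAnyK, pvAnyO, List.any_cons]
    · by_cases hz : normalize_department_status x = "Zakonczone"
      · simp [hz, pvT_DZ, pvAnyZ, List.any_cons]
      · by_cases hk : normalize_department_status x = "Kosmetyka"
        · simp [hk, pvT_DK, pvAnyK, List.any_cons]
        · simp [pvT_miss _ _ hz hd hk, pvAnyO, List.any_cons, hz, hd, hk]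

lemma pvAnyZ_cons (x : String) (xs : List String) :
    pvAnyZ (x :: xs) = ((normalize_department_status x == "Zakonczone") || pvAnyZ xs) := by
  simp [pvAnyZ, List.any_cons]

lemma pvAnyD_cons (x : String) (xs : List String) :
    pvAnyD (x :: xs) = ((normalize_department_status x == "Dokumentacja") || pvAnyD xs) := by
  simp [pvAnyD, List.any_cons]

lemma pvAnyK_cons (x : String) (xs : List String) :
    pvAnyK (x :: xs) = ((normalize_department_status x == "Kosmetyka") || pvAnyK xs) := by
  simp [pvAnyK, List.any_cons]

lemma pvAnyO_cons (x : String) (xs : List String) :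
    pvAnyO (x :: xs) = ((!(normalize_department_status x == "Zakonczone") &&
      !(normalize_department_status x == "Dokumentacja") &&
      !(normalize_department_status x == "Kosmetyka")) || pvAnyO xs) := by
  simp [pvAnyO, List.any_cons]

theorem pvMain (l : List String) :
    derive_order_status_from_position_departments l = derive_order_status_from_position_departments_alt l := by
  unfold derive_order_status_from_position_departments derive_order_status_from_position_departments_alt
  simp only [pvEqZ, pvEqD, pvEqK]
  cases l with
  | nil => simp [pvLoop, pvAnyZ, pvAnyD, pvAnyK, pvAnyO]
  | cons x xs =>
    simp only [pvLoop]
    by_cases hz : normalize_department_status x = "Zakonczone"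
    · rw [hz, pvT_nZ]
      simp only [pvAnyZ_cons, pvAnyD_cons, pvAnyK_cons, pvAnyO_cons, hz, pvLoop_Z]
      cases hD : pvAnyD xs <;> cases hK : pvAnyK xs <;> cases hO : pvAnyO xs <;> cases hZ : pvAnyZ xs <;>
        simp [hD, hK, hO, hZ]
    · by_cases hd : normalize_department_status x = "Dokumentacja"
      · rw [hd, pvT_nD]
        simp only [pvAnyZ_cons, pvAnyD_cons, pvAnyK_cons, pvAnyO_cons, hd, pvLoop_D]
        cases hD : pvAnyD xs <;> cases hK : pvAnyK xs <;> cases hO : pvAnyO xs <;> cases hZ : pvAnyZ xs <;>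
          simp [hD, hK, hO, hZ, hz]
      · by_cases hk : normalize_department_status x = "Kosmetyka"
        · rw [hk, pvT_nK]
          simp only [pvAnyZ_cons, pvAnyD_cons, pvAnyK_cons, pvAnyO_cons, hk, pvLoop_K]
          cases hD : pvAnyD xs <;> cases hK : pvAnyK xs <;> cases hO : pvAnyO xs <;> cases hZ : pvAnyZ xs <;>
            simp [hD, hK, hO, hZ, hz, hd]
        · rw [pvT_miss _ _ hz hd hk]
          simp only [pvAnyZ_cons, pvAnyD_cons, pvAnyK_cons, pvAnyO_cons]
          simp [hz, hd, hk]

-- ===== VERDICT (by name: the statement is the Claim_ definition above) =====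
theorem derive_order_status_from_position_departments_spec : Claim_equal_derive_order_status_from_position_departments := by
  intro l _
  unfold Spec_derive_order_status_from_position_departments
  exact pvMain l
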